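-- pv_equiv track=rewrite | github.com/namanag97/shannon-insight | src/shannon_insight/cli/tui.py | _finding_category
-- ===== SOURCE A (Python) =====
-- def _finding_category(finding_type: str) -> str:
--     """Map finding type to category."""
--     categories = {
--         "coupling": {"hidden_coupling", "accidental_coupling"},
--         "structural": {"phantom_imports", "orphan_code", "hollow_code", "dead_dependency"},
--         "risk": {"high_risk_hub", "bug_attractor", "unstable_file", "thrashing_code"},
--         "complexity": {"god_file", "copy_paste_clone", "naming_drift"},
--         "architecture": {
--             "layer_violation",
--             "zone_of_pain",
--             "boundary_mismatch",
--             "flat_architecture",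
--         },
--         "team": {"knowledge_silo", "review_blindspot", "chronic_problem", "truck_factor"},
--     }
--     for cat, types in categories.items():
--         if finding_type in types:
--             return cat
--     return "other"
-- ===== SOURCE B (Python) =====
-- _CATEGORY_OF = {
--     "hidden_coupling": "coupling",
--     "accidental_coupling": "coupling",
--     "phantom_imports": "structural",
--     "orphan_code": "structural",
--     "hollow_code": "structural",
--     "dead_dependency": "structural",
--     "high_risk_hub": "risk",
--     "bug_attractor": "risk",
--     "unstable_file": "risk",
--     "thrashing_code": "risk",
--     "god_file": "complexity",
--     "copy_paste_clone": "complexity",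
--     "naming_drift": "complexity",
--     "layer_violation": "architecture",
--     "zone_of_pain": "architecture",
--     "boundary_mismatch": "architecture",
--     "flat_architecture": "architecture",
--     "knowledge_silo": "team",
--     "review_blindspot": "team",
--     "chronic_problem": "team",
--     "truck_factor": "team",
-- }
--
--
-- def _finding_category(finding_type: str) -> str:
--     """Map finding type to category via one flat inverted lookup."""
--     return _CATEGORY_OF.get(finding_type, "other")
-- ===== Notes on version B (the rewrite author's own statement) =====
-- stated objective: simpler
-- what changed: The per-call construction of a dict of six sets and the loop with a membership test per category are replaced by one flat module-level inverted dictionary and a single dict.get with default, so the function body is one lookup with no loop.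
import Mathlib
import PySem

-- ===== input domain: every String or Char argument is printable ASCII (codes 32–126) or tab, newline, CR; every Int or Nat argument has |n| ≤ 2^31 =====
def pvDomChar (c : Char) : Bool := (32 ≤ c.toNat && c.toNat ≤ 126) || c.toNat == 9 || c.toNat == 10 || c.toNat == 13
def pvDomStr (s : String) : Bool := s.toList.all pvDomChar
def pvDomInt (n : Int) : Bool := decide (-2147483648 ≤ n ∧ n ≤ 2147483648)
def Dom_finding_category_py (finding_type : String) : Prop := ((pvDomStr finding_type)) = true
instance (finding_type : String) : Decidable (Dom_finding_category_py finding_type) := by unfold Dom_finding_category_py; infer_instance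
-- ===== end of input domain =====

-- B replaces A's per-call dict-of-sets plus loop-with-membership-test by one flat
-- inverted dictionary and a single lookup with default (objective: simpler).

-- ===== PORT A =====
-- Python's 'for cat, types in categories.items(): if finding_type in types: return cat'
def pvCatLoop (finding_type : String) : List (String × PySem.Set String) → String
  | [] => "other"
  | (cat, types) :: rest =>
      if PySem.Set.contains types finding_type then cat
      else pvCatLoop finding_type rest

def finding_category_py (finding_type : String) : String :=
  let categories : PySem.Dict String (PySem.Set String) := PySem.Dict.ofList
    [ ("coupling", PySem.Set.ofList ["hidden_coupling", "accidental_coupling"])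
    , ("structural", PySem.Set.ofList ["phantom_imports", "orphan_code", "hollow_code", "dead_dependency"])
    , ("risk", PySem.Set.ofList ["high_risk_hub", "bug_attractor", "unstable_file", "thrashing_code"])
    , ("complexity", PySem.Set.ofList ["god_file", "copy_paste_clone", "naming_drift"])
    , ("architecture", PySem.Set.ofList ["layer_violation", "zone_of_pain", "boundary_mismatch", "flat_architecture"])
    , ("team", PySem.Set.ofList ["knowledge_silo", "review_blindspot", "chronic_problem", "truck_factor"]) ]
  pvCatLoop finding_type categories.items

-- ===== PORT B =====
def pvCategoryOf : PySem.Dict String String := PySem.Dict.ofList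
  [ ("hidden_coupling", "coupling"), ("accidental_coupling", "coupling")
  , ("phantom_imports", "structural"), ("orphan_code", "structural")
  , ("hollow_code", "structural"), ("dead_dependency", "structural")
  , ("high_risk_hub", "risk"), ("bug_attractor", "risk")
  , ("unstable_file", "risk"), ("thrashing_code", "risk")
  , ("god_file", "complexity"), ("copy_paste_clone", "complexity")
  , ("naming_drift", "complexity")
  , ("layer_violation", "architecture"), ("zone_of_pain", "architecture")
  , ("boundary_mismatch", "architecture"), ("flat_architecture", "architecture")
  , ("knowledge_silo", "team"), ("review_blindspot", "team")
  , ("chronic_problem", "team"), ("truck_factor", "team") ]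

def finding_category_py_alt (finding_type : String) : String :=
  PySem.Dict.getD pvCategoryOf finding_type "other"

-- ===== PRECONDITION & SPEC =====
def Spec_finding_category_py (finding_type : String) (out : String) : Prop := out = finding_category_py_alt finding_type
instance (finding_type : String) (out : String) : Decidable (Spec_finding_category_py finding_type out) := by unfold Spec_finding_category_py; infer_instance

-- ===== CLAIM (what is proved, stated in full; the proofs are below) =====
def Claim_equal_finding_category_py : Prop := ∀ (finding_type : String), Dom_finding_category_py finding_type → Spec_finding_category_py finding_type (finding_category_py finding_type)

-- ===== LEMMAS AND PROOFS =====

-- find? over one category's entries in the flat inverted list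
theorem pv_flat_find (ts : List String) (c s : String) :
    Option.map Prod.snd (List.find? (fun p => p.1 == s) (ts.map (fun t => (t, c)))) =
      if PySem.Set.contains ts s then some c else none := by
  induction ts with
  | nil => simp [PySem.Set.contains]
  | cons t rest ih =>
      simp only [List.map_cons, List.find?_cons, PySem.Set.contains, List.contains_cons] at *
      by_cases h : s = t
      · subst h; simp
      · have h1 : (t == s) = false := by simp [Ne.symm h]
        have h2 : (s == t) = false := by simp [h]
        simp only [h1, h2, Bool.false_or, if_neg, ih]
        rfl

-- A's category loop equals a first-match lookup in the flattened (type, category) list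
theorem pv_loop_eq (L : List (String × List String)) (s : String) :
    pvCatLoop s L =
      (Option.map Prod.snd (List.find? (fun p => p.1 == s)
        (L.flatMap (fun ct => ct.2.map (fun t => (t, ct.1)))))).getD "other" := by
  induction L with
  | nil => simp [pvCatLoop]
  | cons ct rest ih =>
      obtain ⟨c, ts⟩ := ct
      simp only [pvCatLoop, List.flatMap_cons, List.find?_append]
      have hflat := pv_flat_find ts c s
      by_cases h : PySem.Set.contains ts s = true
      · rw [if_pos h] at hflat
        rw [if_pos h]
        obtain ⟨p, hp, hsnd⟩ := Option.map_eq_some_iff.mp hflat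
        rw [hp, Option.some_or, Option.map_some, hsnd]
        rfl
      · rw [if_neg h] at hflat
        rw [if_neg h, Option.map_eq_none_iff.mp hflat, Option.none_or, ih]

theorem pv_eq (s : String) : finding_category_py s = finding_category_py_alt s := by
  show pvCatLoop s _ = _
  rw [pv_loop_eq]
  rfl

-- ===== VERDICT (by name: the statement is the Claim_ definition above) =====
theorem finding_category_py_spec : Claim_equal_finding_category_py := by
  intro s _
  exact pv_eq s
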